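-- pv_equiv track=rewrite | github.com/lagka/Input_Filtering | BERT based/bert_deletion.py | rewrite_function
-- ===== SOURCE A (Python) =====
-- def rewrite_function(cut_word, l1, l2):
--     previous_sent = ''
--     for j in range(len(cut_word)):
--         if j not in l1+l2:
--             previous_sent += cut_word[j]
--         elif j in l1:
--             previous_sent += len(cut_word[j]) * '#'
--         else:
--             previous_sent = previous_sent
--
--     return previous_sent
-- ===== SOURCE B (Python) =====
-- def rewrite_function(cut_word, l1, l2):
--     n = len(cut_word)
--     result = list(cut_word)
--     for i in l1:
--         if 0 <= i < n:
--             result[i] = '#' * len(cut_word[i])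
--     for i in l2:
--         if 0 <= i < n and i not in l1:
--             result[i] = ''
--     return ''.join(result)
-- ===== Notes on version B (the rewrite author's own statement) =====
-- stated objective: faster
-- what changed: Instead of scanning every position with a membership test in the freshly concatenated l1+l2 on each step, B copies the word list once, mutates it by iterating over the index lists (l1 first, then l2 guarded by 'not in l1'), and joins; the per-position scan of l1+l2 disappears.
import Mathlib
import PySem

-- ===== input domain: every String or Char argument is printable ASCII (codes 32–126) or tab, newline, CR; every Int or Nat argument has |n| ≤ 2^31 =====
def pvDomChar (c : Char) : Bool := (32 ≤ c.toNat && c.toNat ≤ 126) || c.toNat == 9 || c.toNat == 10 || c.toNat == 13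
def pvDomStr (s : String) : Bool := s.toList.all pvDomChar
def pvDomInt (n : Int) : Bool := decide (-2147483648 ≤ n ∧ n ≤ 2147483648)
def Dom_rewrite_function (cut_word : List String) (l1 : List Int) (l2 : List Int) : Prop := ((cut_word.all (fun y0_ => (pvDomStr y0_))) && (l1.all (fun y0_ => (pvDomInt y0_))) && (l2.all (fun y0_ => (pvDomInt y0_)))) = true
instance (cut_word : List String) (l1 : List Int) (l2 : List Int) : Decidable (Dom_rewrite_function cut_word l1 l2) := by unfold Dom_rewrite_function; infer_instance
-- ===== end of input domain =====

-- B replaces A's per-position scan of the concatenation l1+l2 with a single mutable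
-- copy of the word list updated by iterating over the index lists, then one join.

-- ===== PORT A =====
-- previous_sent is accumulated as a list of chars; += on strings is append.
def rewrite_function (cut_word : List String) (l1 : List Int) (l2 : List Int) : String :=
  String.ofList ((List.range cut_word.length).foldl (fun prev (j : Nat) =>
    if ¬ ((j : Int) ∈ l1 ++ l2) then prev ++ (cut_word.getD j "").toList
    else if (j : Int) ∈ l1 then prev ++ List.replicate (cut_word.getD j "").toList.length '#'
    else prev) [])

-- ===== PORT B =====
-- result = list(cut_word), as a list of char lists; first mutation pass (for i in l1)
def bMask (cut_word : List String) (r : List (List Char)) (l : List Int) : List (List Char) :=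
  l.foldl (fun r i =>
    if 0 ≤ i ∧ i < (cut_word.length : Int) then
      r.set i.toNat (List.replicate (cut_word.getD i.toNat "").toList.length '#')
    else r) r

-- second mutation pass (for i in l2, skipping indices in l1)
def bDelete (cut_word : List String) (l1 : List Int) (r : List (List Char)) (l : List Int) : List (List Char) :=
  l.foldl (fun r i =>
    if (0 ≤ i ∧ i < (cut_word.length : Int)) ∧ ¬ (i ∈ l1) then r.set i.toNat [] else r) r

def rewrite_function_alt (cut_word : List String) (l1 : List Int) (l2 : List Int) : String :=
  String.ofList (bDelete cut_word l1 (bMask cut_word (cut_word.map String.toList) l1) l2).flatten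

-- ===== PRECONDITION & SPEC =====
def Spec_rewrite_function (cut_word : List String) (l1 : List Int) (l2 : List Int) (out : String) : Prop := out = rewrite_function_alt cut_word l1 l2
instance (cut_word : List String) (l1 : List Int) (l2 : List Int) (out : String) : Decidable (Spec_rewrite_function cut_word l1 l2 out) := by unfold Spec_rewrite_function; infer_instance

-- ===== CLAIM (what is proved, stated in full; the proofs are below) =====
def Claim_equal_rewrite_function : Prop := ∀ (cut_word : List String) (l1 : List Int) (l2 : List Int), Dom_rewrite_function cut_word l1 l2 → Spec_rewrite_function cut_word l1 l2 (rewrite_function cut_word l1 l2)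

-- ===== LEMMAS AND PROOFS =====

-- the per-position value both programs agree on
def pvPiece (cut_word : List String) (l1 : List Int) (l2 : List Int) (j : Nat) : List Char :=
  if (j : Int) ∈ l1 then List.replicate (cut_word.getD j "").toList.length '#'
  else if (j : Int) ∈ l2 then []
  else (cut_word.getD j "").toList

theorem foldl_append_piece (cut_word : List String) (l1 l2 : List Int) :
    ∀ (l : List Nat) (acc : List Char),
      l.foldl (fun prev (j : Nat) =>
        if ¬ ((j : Int) ∈ l1 ++ l2) then prev ++ (cut_word.getD j "").toList
        else if (j : Int) ∈ l1 then prev ++ List.replicate (cut_word.getD j "").toList.length '#'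
        else prev) acc = acc ++ (l.map (pvPiece cut_word l1 l2)).flatten := by
  intro l
  induction l with
  | nil => intro acc; simp
  | cons j t ih =>
    intro acc
    simp only [List.foldl_cons, List.map_cons, List.flatten_cons]
    rw [ih]
    unfold pvPiece
    by_cases h1 : (j : Int) ∈ l1 <;> by_cases h2 : (j : Int) ∈ l2 <;>
      simp [h1, h2, List.mem_append]

theorem bMask_length (cut_word : List String) :
    ∀ (l : List Int) (r : List (List Char)), (bMask cut_word r l).length = r.length := by
  intro l
  induction l with
  | nil => intro r; rfl
  | cons i t ih =>
    intro r
    show (bMask cut_word _ t).length = _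
    rw [ih]
    by_cases h : 0 ≤ i ∧ i < (cut_word.length : Int) <;> simp [h]

theorem bDelete_length (cut_word : List String) (l1 : List Int) :
    ∀ (l : List Int) (r : List (List Char)), (bDelete cut_word l1 r l).length = r.length := by
  intro l
  induction l with
  | nil => intro r; rfl
  | cons i t ih =>
    intro r
    show (bDelete cut_word l1 _ t).length = _
    rw [ih]
    by_cases h : (0 ≤ i ∧ i < (cut_word.length : Int)) ∧ ¬ (i ∈ l1) <;> simp [h]

theorem bMask_getElem? (cut_word : List String) (j : Nat) (hj : j < cut_word.length) :
    ∀ (l : List Int) (r : List (List Char)), r.length = cut_word.length →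
      (bMask cut_word r l)[j]? =
        if (j : Int) ∈ l then
          some (List.replicate (cut_word.getD j "").toList.length '#')
        else r[j]? := by
  intro l
  induction l with
  | nil => intro r _; simp [bMask]
  | cons i t ih =>
    intro r hr
    show (bMask cut_word (if 0 ≤ i ∧ i < (cut_word.length : Int) then
        r.set i.toNat (List.replicate (cut_word.getD i.toNat "").toList.length '#') else r) t)[j]? = _
    rw [ih]
    · by_cases hm : (j : Int) ∈ t
      · simp [hm, List.mem_cons]
      · rw [if_neg hm]
        by_cases hc : 0 ≤ i ∧ i < (cut_word.length : Int)
        · rw [if_pos hc]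
          by_cases hij : i = (j : Int)
          · have hjn : i.toNat = j := by omega
            subst hjn
            rw [List.getElem?_set_self (by omega)]
            have hii : ((i.toNat : Nat) : Int) = i := by omega
            rw [if_pos (by rw [hii]; exact List.mem_cons_self ..)]
          · have hne : i.toNat ≠ j := by omega
            rw [List.getElem?_set_ne hne]
            rw [if_neg (by simp [List.mem_cons, hm]; omega)]
        · rw [if_neg hc]
          rw [if_neg (by
            simp only [List.mem_cons]
            rintro (h | h)
            · exact hc ⟨by omega, by omega⟩
            · exact hm h)]
    · by_cases hc : 0 ≤ i ∧ i < (cut_word.length : Int) <;> simp [hc, hr]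

theorem bDelete_getElem? (cut_word : List String) (l1 : List Int) (j : Nat)
    (hj : j < cut_word.length) :
    ∀ (l : List Int) (r : List (List Char)), r.length = cut_word.length →
      (bDelete cut_word l1 r l)[j]? =
        if (j : Int) ∈ l ∧ ¬ ((j : Int) ∈ l1) then some [] else r[j]? := by
  intro l
  induction l with
  | nil => intro r _; simp [bDelete]
  | cons i t ih =>
    intro r hr
    show (bDelete cut_word l1 (if (0 ≤ i ∧ i < (cut_word.length : Int)) ∧ ¬ (i ∈ l1) then
        r.set i.toNat [] else r) t)[j]? = _
    rw [ih]
    · by_cases hm : (j : Int) ∈ t ∧ ¬ ((j : Int) ∈ l1)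
      · have hall : (↑j ∈ i :: t ∧ ¬ ((j : Int) ∈ l1)) := ⟨List.mem_cons_of_mem _ hm.1, hm.2⟩
        rw [if_pos hm, if_pos hall]
      · rw [if_neg hm]
        by_cases hc : (0 ≤ i ∧ i < (cut_word.length : Int)) ∧ ¬ (i ∈ l1)
        · rw [if_pos hc]
          by_cases hij : i = (j : Int)
          · have hjn : i.toNat = j := by omega
            subst hjn
            rw [List.getElem?_set_self (by omega)]
            have hii : ((i.toNat : Nat) : Int) = i := by omega
            rw [if_pos ((by rw [hii]; exact ⟨List.mem_cons_self .., hc.2⟩ :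
              ((i.toNat : Nat) : Int) ∈ i :: t ∧ ¬ (((i.toNat : Nat) : Int) ∈ l1)))]
          · have hne : i.toNat ≠ j := by omega
            rw [List.getElem?_set_ne hne]
            rw [if_neg (by
              rintro ⟨hmem, hn1⟩
              rcases List.mem_cons.mp hmem with h | h
              · exact hij h.symm
              · exact hm ⟨h, hn1⟩)]
        · rw [if_neg hc]
          rw [if_neg (by
            rintro ⟨hmem, hn1⟩
            rcases List.mem_cons.mp hmem with h | h
            · exact hc ⟨⟨by omega, by omega⟩, h ▸ hn1⟩
            · exact hm ⟨h, hn1⟩)]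
    · by_cases hc : (0 ≤ i ∧ i < (cut_word.length : Int)) ∧ ¬ (i ∈ l1) <;> simp [hc, hr]

theorem alt_r2_eq (cut_word : List String) (l1 l2 : List Int) :
    bDelete cut_word l1 (bMask cut_word (cut_word.map String.toList) l1) l2 =
      (List.range cut_word.length).map (pvPiece cut_word l1 l2) := by
  have hr0 : (cut_word.map String.toList).length = cut_word.length := by simp
  have hr1 : (bMask cut_word (cut_word.map String.toList) l1).length = cut_word.length := by
    rw [bMask_length]; exact hr0
  apply List.ext_getElem?
  intro j
  by_cases hj : j < cut_word.length
  · rw [bDelete_getElem? cut_word l1 j hj l2 _ hr1,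
      bMask_getElem? cut_word j hj l1 _ hr0]
    have hget : (cut_word.map String.toList)[j]? = some (cut_word.getD j "").toList := by
      rw [List.getElem?_map, List.getElem?_eq_getElem hj]
      simp [List.getD, List.getElem?_eq_getElem hj]
    rw [hget, List.getElem?_map, List.getElem?_range hj]
    unfold pvPiece
    by_cases h1 : (j : Int) ∈ l1 <;> by_cases h2 : (j : Int) ∈ l2 <;> simp [h1, h2]
  · rw [List.getElem?_eq_none (by rw [bDelete_length, hr1]; omega),
      List.getElem?_eq_none (by simp; omega)]

theorem rewrite_eq (cut_word : List String) (l1 l2 : List Int) :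
    rewrite_function cut_word l1 l2 = rewrite_function_alt cut_word l1 l2 := by
  unfold rewrite_function rewrite_function_alt
  rw [foldl_append_piece, alt_r2_eq]
  simp

-- ===== VERDICT (by name: the statement is the Claim_ definition above) =====
theorem rewrite_function_spec : Claim_equal_rewrite_function := by
  intro cw l1 l2 _
  unfold Spec_rewrite_function
  exact rewrite_eq cw l1 l2
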